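-- pv_equiv track=rewrite | github.com/ThundeRayn/3MI3 | TUT materials/T3.py | statment
-- ===== SOURCE A (Python) =====
-- EOI = 'EOI'  # end of input
--
-- Tr = 'Tr'  # Constant True - True
--
-- Fa = 'Fa'  # Constant False - False
--
-- Ze = 'Ze'  # Constant Zero - 0
--
-- Succ = 'Succ'  # Successor (succ term)
--
-- Pred = 'Pred'  # Predecessor (pred term)
--
-- IsZero = 'IsZero'  # Zero Test (isZero term)
--
-- IfThenElse = 'IfThenElse'  # Conditional Expression (if term then term else term)
--
-- LP = 'LP'  # Character (
--
-- RP = 'RP'  # Character )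
--
-- ERR = 'ERR'  # Showing Error
--
-- THEN = 'THEN'
--
-- ELSE = 'ELSE'
--
-- def EatWhiteSpace(s, spp):
--     j = len(s)
--     if spp >= j:
--         return spp
--
--     while s[spp] == ' ' or s[spp] == '\n':
--         spp = spp + 1
--         if spp >= j:
--             break
--
--     return spp
--
-- def statment(s, spp, indent, result):
--     #show(indent, 'statment', s, spp)
--     indent1 = indent + ' '
--
--     # Keep the previous position saved
--     previous_spp = spp
--
--     # Let's read a token
--     token, spp = NextToken(s, spp)
--
--     if token == EOI or token == ERR:
--         # Statement is a True term
--         # Add the term to the list of tokens and return the statement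
--         result.append(token)
--         return result, spp
--     elif token == THEN or token == ELSE:
--         return statment(s, spp, indent, result)
--     else:
--         # token == LP or token == IfThenElse or token == RP or token == Succ or token == Pred or token == IsZero
--         # or token == IfThenElse:
--         # We are going to either read another statement
--         # Add the term and read another statement
--         result.append(token)
--         return statment(s, spp, indent, result)
--
-- def NextToken(s, spp):
--     spp1 = spp
--     spp = EatWhiteSpace(s, spp)
--     j = len(s)
--     if spp >= j:
--         return EOI, spp
--     elif s[spp: spp + 4] == 'pred':
--         return Pred, spp + 4
--     elif s[spp: spp + 4] == "succ":
--         return Succ, spp + 4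
--     elif s[spp: spp + 6] == "isZero":
--         return IsZero, spp + 6
--     elif s[spp: spp + 2] == "if":
--         return IfThenElse, spp + 2
--     elif s[spp: spp + 4] == "then":
--         return THEN, spp + 4
--     elif s[spp: spp + 4] == "else":
--         return ELSE, spp + 4
--     elif s[spp] == "(":
--         return LP, spp + 1
--     elif s[spp] == ")":
--         return RP, spp + 1
--     elif s[spp] == "0":
--         return Ze, spp + 1
--     elif s[spp:spp + 4] == "true":
--         return Tr, spp + 4
--     elif s[spp:spp + 5] == "false":
--         return Fa, spp + 5
--     else:
--         return ERR, spp1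
-- ===== SOURCE B (Python) =====
-- EOI = 'EOI'
-- Tr = 'Tr'
-- Fa = 'Fa'
-- Ze = 'Ze'
-- Succ = 'Succ'
-- Pred = 'Pred'
-- IsZero = 'IsZero'
-- IfThenElse = 'IfThenElse'
-- LP = 'LP'
-- RP = 'RP'
-- ERR = 'ERR'
-- THEN = 'THEN'
-- ELSE = 'ELSE'
--
-- # Longest-match-first keyword table ('isZero' before 'if'); THEN/ELSE are recognised but dropped.
-- _TABLE = (('isZero', IsZero), ('if', IfThenElse), ('pred', Pred), ('succ', Succ),
--           ('then', THEN), ('else', ELSE), ('true', Tr), ('false', Fa),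
--           ('(', LP), (')', RP), ('0', Ze))
--
-- def statment(s, spp, indent, result):
--     n = len(s)
--     while True:
--         start = spp
--         while spp < n and s[spp] in ' \n':
--             spp += 1
--         if spp >= n:
--             result.append(EOI)
--             return result, spp
--         for word, tok in _TABLE:
--             if s.startswith(word, spp):
--                 spp += len(word)
--                 if tok is not THEN and tok is not ELSE:
--                     result.append(tok)
--                 break
--         else:
--             result.append(ERR)
--             return result, start
-- ===== Notes on version B (the rewrite author's own statement) =====
-- stated objective: alternative
-- what changed: Replaces A's tail recursion over an 11-branch if/elif token chain (NextToken + EatWhiteSpace helpers) by a single iterative while-loop that skips whitespace and scans one keyword table with startswith (longest-match entries first), appending tokens and dropping THEN/ELSE as it goes.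
-- outside the precondition, e.g. on statment('z)rt)dif', -2, '', []): A returns (['ERR'], -2), B returns (['IfThenElse', 'ERR'], 0); on statment('0', -5, '', []): A raises IndexError, B raises IndexError
import Mathlib
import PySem

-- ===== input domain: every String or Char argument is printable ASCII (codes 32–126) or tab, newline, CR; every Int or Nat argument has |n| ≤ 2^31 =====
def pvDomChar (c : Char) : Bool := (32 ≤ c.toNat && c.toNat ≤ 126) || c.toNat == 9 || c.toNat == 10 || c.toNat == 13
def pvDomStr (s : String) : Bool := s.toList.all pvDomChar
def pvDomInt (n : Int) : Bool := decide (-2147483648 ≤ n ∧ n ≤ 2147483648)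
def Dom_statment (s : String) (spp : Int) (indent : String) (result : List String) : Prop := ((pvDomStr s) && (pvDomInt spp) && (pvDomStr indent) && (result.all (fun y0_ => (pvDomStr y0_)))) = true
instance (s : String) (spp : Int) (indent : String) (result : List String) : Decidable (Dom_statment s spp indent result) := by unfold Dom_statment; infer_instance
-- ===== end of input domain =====

-- B replaces A's tail-recursive 11-branch if/elif scanner by an iterative loop over a single keyword
-- table (alternative decomposition, not claimed faster); both Pythons append to the same `result` list
-- in place — the theorems are about the return value.


-- ===== PORT A =====
-- EatWhiteSpace's `while` loop (entered only with spp < j; `spp = spp + 1` is inlined)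
def pvEatLoop (cs : List Char) (j spp : Int) : Int :=
  if PySem.List.pyGet? cs spp = some ' ' ∨ PySem.List.pyGet? cs spp = some '\n' then
    if spp + 1 ≥ j then spp + 1 else pvEatLoop cs j (spp + 1)
  else spp
termination_by (j - spp).toNat
decreasing_by omega

def pvEatWhiteSpace (cs : List Char) (spp : Int) : Int :=
  if spp ≥ (cs.length : Int) then spp else pvEatLoop cs (cs.length : Int) spp

-- NextToken (spp1 = the entry spp, inlined in the ERR branch; the shadowing `spp = EatWhiteSpace(..)`
-- is written out as the term `pvEatWhiteSpace cs spp`)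
def pvNextToken (cs : List Char) (spp : Int) : String × Int :=
  if pvEatWhiteSpace cs spp ≥ (cs.length : Int) then ("EOI", pvEatWhiteSpace cs spp)
  else if PySem.List.slice cs (some (pvEatWhiteSpace cs spp)) (some (pvEatWhiteSpace cs spp + 4)) = "pred".toList then ("Pred", pvEatWhiteSpace cs spp + 4)
  else if PySem.List.slice cs (some (pvEatWhiteSpace cs spp)) (some (pvEatWhiteSpace cs spp + 4)) = "succ".toList then ("Succ", pvEatWhiteSpace cs spp + 4)
  else if PySem.List.slice cs (some (pvEatWhiteSpace cs spp)) (some (pvEatWhiteSpace cs spp + 6)) = "isZero".toList then ("IsZero", pvEatWhiteSpace cs spp + 6)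
  else if PySem.List.slice cs (some (pvEatWhiteSpace cs spp)) (some (pvEatWhiteSpace cs spp + 2)) = "if".toList then ("IfThenElse", pvEatWhiteSpace cs spp + 2)
  else if PySem.List.slice cs (some (pvEatWhiteSpace cs spp)) (some (pvEatWhiteSpace cs spp + 4)) = "then".toList then ("THEN", pvEatWhiteSpace cs spp + 4)
  else if PySem.List.slice cs (some (pvEatWhiteSpace cs spp)) (some (pvEatWhiteSpace cs spp + 4)) = "else".toList then ("ELSE", pvEatWhiteSpace cs spp + 4)
  else if PySem.List.pyGet? cs (pvEatWhiteSpace cs spp) = some '(' then ("LP", pvEatWhiteSpace cs spp + 1)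
  else if PySem.List.pyGet? cs (pvEatWhiteSpace cs spp) = some ')' then ("RP", pvEatWhiteSpace cs spp + 1)
  else if PySem.List.pyGet? cs (pvEatWhiteSpace cs spp) = some '0' then ("Ze", pvEatWhiteSpace cs spp + 1)
  else if PySem.List.slice cs (some (pvEatWhiteSpace cs spp)) (some (pvEatWhiteSpace cs spp + 4)) = "true".toList then ("Tr", pvEatWhiteSpace cs spp + 4)
  else if PySem.List.slice cs (some (pvEatWhiteSpace cs spp)) (some (pvEatWhiteSpace cs spp + 5)) = "false".toList then ("Fa", pvEatWhiteSpace cs spp + 5)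
  else ("ERR", spp)

-- termination facts for statment's recursion (cited by its decreasing_by)
theorem pvEatLoop_ge (cs : List Char) (j spp : Int) : spp ≤ pvEatLoop cs j spp := by
  fun_induction pvEatLoop cs j spp <;> omega

theorem pvEatWhiteSpace_ge (cs : List Char) (spp : Int) : spp ≤ pvEatWhiteSpace cs spp := by
  rw [pvEatWhiteSpace]; split
  · omega
  · exact pvEatLoop_ge cs _ spp

set_option maxHeartbeats 1000000 in
theorem pvNextToken_advance (cs : List Char) (spp : Int)
    (h1 : (pvNextToken cs spp).1 ≠ "EOI") (h2 : (pvNextToken cs spp).1 ≠ "ERR") :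
    spp < (pvNextToken cs spp).2 ∧ (pvNextToken cs spp).2 ≤ (cs.length : Int) + 6 := by
  have hge := pvEatWhiteSpace_ge cs spp
  rw [pvNextToken] at h1 h2 ⊢
  set e := pvEatWhiteSpace cs spp with he
  by_cases q0 : e ≥ (cs.length : Int)
  · rw [if_pos q0] at h1
    exact absurd rfl h1
  · rw [if_neg q0] at h2 ⊢
    by_cases q1 : PySem.List.slice cs (some e) (some (e + 4)) = "pred".toList
    · rw [if_pos q1] at h2 ⊢
      dsimp only
      omega
    rw [if_neg q1] at h2 ⊢
    by_cases q2 : PySem.List.slice cs (some e) (some (e + 4)) = "succ".toList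
    · rw [if_pos q2] at h2 ⊢
      dsimp only
      omega
    rw [if_neg q2] at h2 ⊢
    by_cases q3 : PySem.List.slice cs (some e) (some (e + 6)) = "isZero".toList
    · rw [if_pos q3] at h2 ⊢
      dsimp only
      omega
    rw [if_neg q3] at h2 ⊢
    by_cases q4 : PySem.List.slice cs (some e) (some (e + 2)) = "if".toList
    · rw [if_pos q4] at h2 ⊢
      dsimp only
      omega
    rw [if_neg q4] at h2 ⊢
    by_cases q5 : PySem.List.slice cs (some e) (some (e + 4)) = "then".toList
    · rw [if_pos q5] at h2 ⊢
      dsimp only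
      omega
    rw [if_neg q5] at h2 ⊢
    by_cases q6 : PySem.List.slice cs (some e) (some (e + 4)) = "else".toList
    · rw [if_pos q6] at h2 ⊢
      dsimp only
      omega
    rw [if_neg q6] at h2 ⊢
    by_cases q7 : PySem.List.pyGet? cs e = some '('
    · rw [if_pos q7] at h2 ⊢
      dsimp only
      omega
    rw [if_neg q7] at h2 ⊢
    by_cases q8 : PySem.List.pyGet? cs e = some ')'
    · rw [if_pos q8] at h2 ⊢
      dsimp only
      omega
    rw [if_neg q8] at h2 ⊢
    by_cases q9 : PySem.List.pyGet? cs e = some '0'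
    · rw [if_pos q9] at h2 ⊢
      dsimp only
      omega
    rw [if_neg q9] at h2 ⊢
    by_cases q10 : PySem.List.slice cs (some e) (some (e + 4)) = "true".toList
    · rw [if_pos q10] at h2 ⊢
      dsimp only
      omega
    rw [if_neg q10] at h2 ⊢
    by_cases q11 : PySem.List.slice cs (some e) (some (e + 5)) = "false".toList
    · rw [if_pos q11] at h2 ⊢
      dsimp only
      omega
    rw [if_neg q11] at h2 ⊢
    exact absurd rfl h2

-- statment (the local variables indent1 and previous_spp are unused in the Python and omitted;
-- `token, spp = NextToken(s, spp)` is written as the two projections of pvNextToken)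
def statment (s : String) (spp : Int) (indent : String) (result : List String) : List String × Int :=
  if (pvNextToken s.toList spp).1 = "EOI" ∨ (pvNextToken s.toList spp).1 = "ERR" then
    (result ++ [(pvNextToken s.toList spp).1], (pvNextToken s.toList spp).2)
  else if (pvNextToken s.toList spp).1 = "THEN" ∨ (pvNextToken s.toList spp).1 = "ELSE" then
    statment s (pvNextToken s.toList spp).2 indent result
  else
    statment s (pvNextToken s.toList spp).2 indent (result ++ [(pvNextToken s.toList spp).1])
termination_by ((s.toList.length : Int) + 7 - spp).toNat
decreasing_by
  all_goals
    have h := pvNextToken_advance s.toList spp (by tauto) (by tauto)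
    omega

-- ===== PORT B =====
-- Source B's keyword table ('isZero' before 'if'; THEN/ELSE recognised but dropped)
def pvTable : List (List Char × String) :=
  [("isZero".toList, "IsZero"), ("if".toList, "IfThenElse"), ("pred".toList, "Pred"),
   ("succ".toList, "Succ"), ("then".toList, "THEN"), ("else".toList, "ELSE"),
   ("true".toList, "Tr"), ("false".toList, "Fa"),
   ("(".toList, "LP"), (")".toList, "RP"), ("0".toList, "Ze")]

-- Source B's `while spp < n and s[spp] in ' \n'` whitespace skip
def pvSkipWs (cs : List Char) (n spp : Int) : Int :=
  if spp < n ∧ (PySem.List.pyGet? cs spp = some ' ' ∨ PySem.List.pyGet? cs spp = some '\n') then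
    pvSkipWs cs n (spp + 1)
  else spp
termination_by (n - spp).toNat
decreasing_by omega

theorem pvSkipWs_ge (cs : List Char) (n spp : Int) : spp ≤ pvSkipWs cs n spp := by
  fun_induction pvSkipWs cs n spp <;> omega

theorem pvTable_word_len : ∀ wt ∈ pvTable, 1 ≤ wt.1.length := by decide

-- Source B's `while True` loop: the for/else over the table is `List.find?`; `s.startswith(word, spp)`
-- is ported as the slice comparison s[spp:spp+len(word)] == word — exact for the 0 ≤ spp
-- positions Pre_ admits (`start` is the entry spp of the iteration, inlined in the ERR return).
def pvStatLoop (cs : List Char) (n spp : Int) (result : List String) : List String × Int :=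
  if pvSkipWs cs n spp ≥ n then (result ++ ["EOI"], pvSkipWs cs n spp)
  else
    match hfind : pvTable.find? (fun wt => PySem.List.slice cs (some (pvSkipWs cs n spp)) (some (pvSkipWs cs n spp + (wt.1.length : Int))) = wt.1) with
    | some wt =>
        pvStatLoop cs n (pvSkipWs cs n spp + (wt.1.length : Int))
          (if wt.2 ≠ "THEN" ∧ wt.2 ≠ "ELSE" then result ++ [wt.2] else result)
    | none => (result ++ ["ERR"], spp)
termination_by (n + 7 - spp).toNat
decreasing_by
  have h1 := pvSkipWs_ge cs n spp
  have h2 := pvTable_word_len wt (List.mem_of_find?_eq_some hfind)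
  omega

def statment_alt (s : String) (spp : Int) (indent : String) (result : List String) : List String × Int :=
  pvStatLoop s.toList (s.toList.length : Int) spp result

-- ===== PRECONDITION & SPEC =====
-- Pre_ excludes negative start positions spp: there A raises IndexError for spp < -len(s), and for
-- -len(s) ≤ spp < 0 returns via Python's negative-index/slice wraparound — tokenizing from a
-- position counted from the end of the string is an accidental corner no caller specifies, and A's
-- and B's values there are equally arbitrary.
def Pre_statment (s : String) (spp : Int) (indent : String) (result : List String) : Prop := 0 ≤ spp
instance (s : String) (spp : Int) (indent : String) (result : List String) : Decidable (Pre_statment s spp indent result) := by unfold Pre_statment; infer_instance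

def pvWitness_statment : String × Int × String × List String :=
  ("if isZero 0 then succ 0 else pred 0", 0, " ", ["LP"])

def Spec_statment (s : String) (spp : Int) (indent : String) (result : List String) (out : List String × Int) : Prop := out = statment_alt s spp indent result
instance (s : String) (spp : Int) (indent : String) (result : List String) (out : List String × Int) : Decidable (Spec_statment s spp indent result out) := by unfold Spec_statment; infer_instance

-- ===== CLAIM (what is proved, stated in full; the proofs are below) =====
def Claim_equal_statment : Prop := ∀ (s : String) (spp : Int) (indent : String) (result : List String), Dom_statment s spp indent result → Pre_statment s spp indent result → Spec_statment s spp indent result (statment s spp indent result)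

-- ===== LEMMAS AND PROOFS =====

-- A's token decision chain, expressed on the suffix t = cs.drop spp of the input
-- (token, number of characters consumed); `none` is A's ERR branch.
def pvChA (t : List Char) : Option (String × Nat) :=
  if t.take 4 = ['p', 'r', 'e', 'd'] then some ("Pred", 4)
  else if t.take 4 = ['s', 'u', 'c', 'c'] then some ("Succ", 4)
  else if t.take 6 = ['i', 's', 'Z', 'e', 'r', 'o'] then some ("IsZero", 6)
  else if t.take 2 = ['i', 'f'] then some ("IfThenElse", 2)
  else if t.take 4 = ['t', 'h', 'e', 'n'] then some ("THEN", 4)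
  else if t.take 4 = ['e', 'l', 's', 'e'] then some ("ELSE", 4)
  else if t.head? = some '(' then some ("LP", 1)
  else if t.head? = some ')' then some ("RP", 1)
  else if t.head? = some '0' then some ("Ze", 1)
  else if t.take 4 = ['t', 'r', 'u', 'e'] then some ("Tr", 4)
  else if t.take 5 = ['f', 'a', 'l', 's', 'e'] then some ("Fa", 5)
  else none

theorem slice_take {p : Int} (h0 : 0 ≤ p) (cs : List Char) (q : Int) (hq : 0 ≤ q) :
    PySem.List.slice cs (some p) (some (p + q)) = (cs.drop p.toNat).take q.toNat := by
  rw [PySem.List.slice_toNat cs h0 (by omega)]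
  congr 1
  omega

theorem pyGet?_head {p : Int} (h0 : 0 ≤ p) (cs : List Char) :
    PySem.List.pyGet? cs p = (cs.drop p.toNat).head? := by
  rw [List.head?_drop]
  obtain ⟨m, rfl⟩ : ∃ m : Nat, p = (m : Int) := ⟨p.toNat, (Int.toNat_of_nonneg h0).symm⟩
  simp [pysem]

-- the two whitespace loops agree
theorem eatLoop_eq_skip (cs : List Char) (n : Int) :
    ∀ (k : Nat) (spp : Int), (n - spp).toNat = k → spp < n →
      pvEatLoop cs n spp = pvSkipWs cs n spp := by
  intro k
  induction k using Nat.strong_induction_on with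
  | _ k IH =>
    intro spp hk hlt
    rw [pvEatLoop]
    by_cases hws : PySem.List.pyGet? cs spp = some ' ' ∨ PySem.List.pyGet? cs spp = some '\n'
    · have hcond : spp < n ∧ (PySem.List.pyGet? cs spp = some ' ' ∨ PySem.List.pyGet? cs spp = some '\n') := ⟨hlt, hws⟩
      rw [if_pos hws]
      conv_rhs => rw [pvSkipWs, if_pos hcond]
      by_cases hstop : spp + 1 ≥ n
      · rw [if_pos hstop, pvSkipWs, if_neg (fun hc => absurd hc.1 (by omega))]
      · rw [if_neg hstop]
        exact IH ((n - (spp + 1)).toNat) (by omega) (spp + 1) rfl (by omega)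
    · conv_rhs => rw [pvSkipWs, if_neg (fun hc => absurd hc.2 hws)]
      rw [if_neg hws]

theorem eat_eq_skip (cs : List Char) (spp : Int) :
    pvEatWhiteSpace cs spp = pvSkipWs cs (cs.length : Int) spp := by
  rw [pvEatWhiteSpace]
  by_cases h : spp ≥ (cs.length : Int)
  · rw [if_pos h, pvSkipWs, if_neg (fun hc => absurd hc.1 (by omega))]
  · rw [if_neg h]
    exact eatLoop_eq_skip cs _ _ spp rfl (by omega)

-- the 11 keyword tests are pairwise exclusive, so A's if/elif order and B's table order
-- pick the same token: exhaustive case analysis on the first six characters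
set_option maxHeartbeats 1000000 in
theorem chain_core (t : List Char) :
    (pvTable.find? (fun wt => t.take wt.1.length = wt.1)).map (fun wt => (wt.2, wt.1.length))
      = pvChA t := by
  rcases t with _ | ⟨a, _ | ⟨b, _ | ⟨c, _ | ⟨d, _ | ⟨e, _ | ⟨f, t⟩⟩⟩⟩⟩⟩ <;>
    (simp [pvTable, pvChA, List.find?]; try split_ifs <;> simp_all)
  all_goals (repeat (first | rfl | (split <;> simp_all)))

theorem find_eq_chA (cs : List Char) (p : Int) (h0 : 0 ≤ p) :
    (pvTable.find? (fun wt => PySem.List.slice cs (some p) (some (p + (wt.1.length : Int))) = wt.1)).map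
      (fun wt => (wt.2, wt.1.length)) = pvChA (cs.drop p.toNat) := by
  have hpred : (fun wt : List Char × String => decide (PySem.List.slice cs (some p) (some (p + (wt.1.length : Int))) = wt.1))
      = (fun wt : List Char × String => decide ((cs.drop p.toNat).take wt.1.length = wt.1)) := by
    funext wt
    rw [slice_take h0 cs (wt.1.length : Int) (by omega), Int.toNat_natCast]
  rw [hpred, chain_core]

-- pvNextToken through pvSkipWs and pvChA
set_option maxHeartbeats 1000000 in
theorem nextToken_eq (cs : List Char) (spp : Int) (h0 : 0 ≤ spp) :
    pvNextToken cs spp =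
      if pvSkipWs cs (cs.length : Int) spp ≥ (cs.length : Int) then
        ("EOI", pvSkipWs cs (cs.length : Int) spp)
      else
        match pvChA (cs.drop (pvSkipWs cs (cs.length : Int) spp).toNat) with
        | some (tok, k) => (tok, pvSkipWs cs (cs.length : Int) spp + (k : Int))
        | none => ("ERR", spp) := by
  rw [pvNextToken, eat_eq_skip]
  by_cases hend : pvSkipWs cs (cs.length : Int) spp ≥ (cs.length : Int)
  · rw [if_pos hend, if_pos hend]
  · rw [if_neg hend, if_neg hend]
    have hp0 : (0 : Int) ≤ pvSkipWs cs (cs.length : Int) spp :=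
      le_trans h0 (pvSkipWs_ge cs (cs.length : Int) spp)
    set P := pvSkipWs cs (cs.length : Int) spp with hPd
    have h2 := slice_take hp0 cs 2 (by omega)
    have h4 := slice_take hp0 cs 4 (by omega)
    have h5 := slice_take hp0 cs 5 (by omega)
    have h6 := slice_take hp0 cs 6 (by omega)
    have hg := pyGet?_head hp0 cs
    have e1 : ((1 : Int)).toNat = 1 := rfl
    have e2 : ((2 : Int)).toNat = 2 := rfl
    have e4 : ((4 : Int)).toNat = 4 := rfl
    have e5 : ((5 : Int)).toNat = 5 := rfl
    have e6 : ((6 : Int)).toNat = 6 := rfl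
    have wpred : "pred".toList = ['p', 'r', 'e', 'd'] := rfl
    have wsucc : "succ".toList = ['s', 'u', 'c', 'c'] := rfl
    have wiso : "isZero".toList = ['i', 's', 'Z', 'e', 'r', 'o'] := rfl
    have wif : "if".toList = ['i', 'f'] := rfl
    have wthen : "then".toList = ['t', 'h', 'e', 'n'] := rfl
    have welse : "else".toList = ['e', 'l', 's', 'e'] := rfl
    have wtrue : "true".toList = ['t', 'r', 'u', 'e'] := rfl
    have wfalse : "false".toList = ['f', 'a', 'l', 's', 'e'] := rfl
    simp only [h2, h4, h5, h6, hg, e1, e2, e4, e5, e6,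
      wpred, wsucc, wiso, wif, wthen, welse, wtrue, wfalse, pvChA]
    by_cases c1 : List.take 4 (List.drop P.toNat cs) = ['p', 'r', 'e', 'd']
    · rw [if_pos c1, if_pos c1]
      simp
    rw [if_neg c1, if_neg c1]
    by_cases c2 : List.take 4 (List.drop P.toNat cs) = ['s', 'u', 'c', 'c']
    · rw [if_pos c2, if_pos c2]
      simp
    rw [if_neg c2, if_neg c2]
    by_cases c3 : List.take 6 (List.drop P.toNat cs) = ['i', 's', 'Z', 'e', 'r', 'o']
    · rw [if_pos c3, if_pos c3]
      simp
    rw [if_neg c3, if_neg c3]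
    by_cases c4 : List.take 2 (List.drop P.toNat cs) = ['i', 'f']
    · rw [if_pos c4, if_pos c4]
      simp
    rw [if_neg c4, if_neg c4]
    by_cases c5 : List.take 4 (List.drop P.toNat cs) = ['t', 'h', 'e', 'n']
    · rw [if_pos c5, if_pos c5]
      simp
    rw [if_neg c5, if_neg c5]
    by_cases c6 : List.take 4 (List.drop P.toNat cs) = ['e', 'l', 's', 'e']
    · rw [if_pos c6, if_pos c6]
      simp
    rw [if_neg c6, if_neg c6]
    by_cases c7 : (List.drop P.toNat cs).head? = some '('
    · rw [if_pos c7, if_pos c7]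
      simp
    rw [if_neg c7, if_neg c7]
    by_cases c8 : (List.drop P.toNat cs).head? = some ')'
    · rw [if_pos c8, if_pos c8]
      simp
    rw [if_neg c8, if_neg c8]
    by_cases c9 : (List.drop P.toNat cs).head? = some '0'
    · rw [if_pos c9, if_pos c9]
      simp
    rw [if_neg c9, if_neg c9]
    by_cases c10 : List.take 4 (List.drop P.toNat cs) = ['t', 'r', 'u', 'e']
    · rw [if_pos c10, if_pos c10]
      simp
    rw [if_neg c10, if_neg c10]
    by_cases c11 : List.take 5 (List.drop P.toNat cs) = ['f', 'a', 'l', 's', 'e']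
    · rw [if_pos c11, if_pos c11]
      simp
    rw [if_neg c11, if_neg c11]

set_option maxHeartbeats 1000000 in
theorem chA_some_facts (t : List Char) (tok : String) (k : Nat) (h : pvChA t = some (tok, k)) :
    tok ≠ "EOI" ∧ tok ≠ "ERR" ∧ 1 ≤ k ∧ k ≤ 6 := by
  unfold pvChA at h
  split_ifs at h <;> simp_all
  all_goals (obtain ⟨h1, h2⟩ := h; subst h1; subst h2; decide)

set_option maxHeartbeats 1000000 in
theorem statment_eq_loop (s : String) (spp : Int) (indent : String) (result : List String)
    (h0 : 0 ≤ spp) :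
    statment s spp indent result = pvStatLoop s.toList (s.toList.length : Int) spp result := by
  have key : ∀ (m : Nat) (spp : Int) (result : List String),
      ((s.toList.length : Int) + 7 - spp).toNat = m → 0 ≤ spp →
      statment s spp indent result = pvStatLoop s.toList (s.toList.length : Int) spp result := by
    intro m
    induction m using Nat.strong_induction_on with
    | _ m IH =>
      intro spp result hm h0
      rw [statment, pvStatLoop]
      rw [nextToken_eq s.toList spp h0]
      set n := ((s.toList.length : Nat) : Int) with hn
      set P := pvSkipWs s.toList n spp with hP
      have hskip : spp ≤ P := pvSkipWs_ge s.toList n spp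
      have hp0 : (0 : Int) ≤ P := le_trans h0 hskip
      by_cases hend : P ≥ n
      · rw [if_pos hend, if_pos hend]
        dsimp only
        rw [if_pos (Or.inl rfl)]
      · rw [if_neg hend, if_neg hend]
        have hfind := find_eq_chA s.toList P hp0
        rcases hA : pvChA (s.toList.drop P.toNat) with _ | ⟨tok, k⟩
        · rw [hA] at hfind
          dsimp only
          rw [if_pos (Or.inr rfl)]
          split
          · rename_i wt heq
            rw [heq] at hfind
            simp at hfind
          · rfl
        · rw [hA] at hfind
          obtain ⟨hne1, hne2, hk1, hk6⟩ := chA_some_facts _ _ _ hA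
          have hAne : ¬(tok = "EOI" ∨ tok = "ERR") := by tauto
          have hmeas : (n + 7 - (P + (k : Int))).toNat < m := by omega
          have h0' : (0 : Int) ≤ P + (k : Int) := by omega
          dsimp only
          rw [if_neg hAne]
          by_cases hTE : tok = "THEN" ∨ tok = "ELSE"
          · rw [if_pos hTE]
            split
            · rename_i wt heq
              rw [heq] at hfind
              simp only [Option.map_some, Option.some_inj, Prod.mk.injEq] at hfind
              obtain ⟨htok, hlen⟩ := hfind
              rw [hlen, if_neg (by rw [htok]; tauto)]
              exact IH _ hmeas _ _ rfl h0'
            · rename_i heq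
              rw [heq] at hfind
              simp at hfind
          · rw [if_neg hTE]
            split
            · rename_i wt heq
              rw [heq] at hfind
              simp only [Option.map_some, Option.some_inj, Prod.mk.injEq] at hfind
              obtain ⟨htok, hlen⟩ := hfind
              rw [hlen, if_pos (by rw [htok]; tauto), htok]
              exact IH _ hmeas _ _ rfl h0'
            · rename_i heq
              rw [heq] at hfind
              simp at hfind
  exact key _ spp result rfl h0

-- ===== VERDICT (by name: the statement is the Claim_ definition above) =====
theorem statment_spec : Claim_equal_statment := by
  intro s spp indent result _hd hpre
  unfold Spec_statment
  exact statment_eq_loop s spp indent result hpre
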